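-- pv_equiv track=rewrite | github.com/yokoyamatoyou/POC | src/multimodal/ocr/llm_correction.py | should_use_llm_correction
-- ===== SOURCE A (Python) =====
-- def should_use_llm_correction(ocr_text: str) -> bool:
--     """LLM補正を使うかどうかの判定"""
--     if not ocr_text.strip():
--         return False
--
--     # 短すぎるテキストは補正不要
--     if len(ocr_text.strip()) < 10:
--         return False
--
--     # 明らかな誤認識パターンをチェック
--     suspicious_patterns = [
--         # 数字・文字の混同
--         'O', '0', 'o',  # 大文字O、数字0、小文字o
--         'I', 'l', '1', '|',  # 大文字I、小文字l、数字1、縦線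
--     ]
--
--     # 複数の疑わしいパターンが含まれている場合に補正使用
--     suspicious_count = 0
--     for pattern in suspicious_patterns:
--         suspicious_count += ocr_text.count(pattern)
--
--     return suspicious_count >= 3  # 3つ以上の疑わしいパターンがあれば補正使用
-- ===== SOURCE B (Python) =====
-- _SUSPICIOUS = {'O', '0', 'o', 'I', 'l', '1', '|'}
--
--
-- def should_use_llm_correction(ocr_text: str) -> bool:
--     """LLM補正を使うかどうかの判定"""
--     # covers the empty/whitespace-only case too (len 0 < 10)
--     if len(ocr_text.strip()) < 10:
--         return False
--
--     count = 0
--     for ch in ocr_text: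
--         if ch in _SUSPICIOUS:
--             count += 1
--             if count >= 3:
--                 return True
--     return False
-- ===== Notes on version B (the rewrite author's own statement) =====
-- stated objective: alternative
-- what changed: Replaces seven whole-text .count() scans with a single pass over the characters keeping one counter of suspicious characters and exiting early at the threshold 3; trades C-level str.count scans for one Python-level loop.
import Mathlib
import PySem

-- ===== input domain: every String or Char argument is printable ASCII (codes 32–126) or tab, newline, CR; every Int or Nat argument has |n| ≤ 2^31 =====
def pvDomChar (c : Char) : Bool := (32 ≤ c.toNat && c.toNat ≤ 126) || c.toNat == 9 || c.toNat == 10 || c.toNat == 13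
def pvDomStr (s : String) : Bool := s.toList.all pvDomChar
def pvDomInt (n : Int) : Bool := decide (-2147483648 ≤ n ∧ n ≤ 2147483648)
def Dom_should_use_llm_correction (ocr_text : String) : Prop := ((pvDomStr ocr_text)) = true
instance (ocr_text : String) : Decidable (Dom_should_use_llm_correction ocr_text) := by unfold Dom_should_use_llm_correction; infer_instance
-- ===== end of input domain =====

-- B: alternative decomposition — one pass over the characters with a suspicious-set counter and an early exit at 3, instead of seven whole-text .count() scans.

-- ===== PORT A =====
def should_use_llm_correction (ocr_text : String) : Bool :=
  if PySem.Str.strip ocr_text = "" then false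
  else if PySem.Str.len (PySem.Str.strip ocr_text) < 10 then false
  else
    let suspicious_patterns : List String := ["O", "0", "o", "I", "l", "1", "|"]
    let suspicious_count : Int :=
      suspicious_patterns.foldl (fun acc p => acc + (PySem.Str.count ocr_text p : Int)) 0
    decide (suspicious_count ≥ 3)

-- ===== PORT B =====
def pvSuspChars : List Char := ['O', '0', 'o', 'I', 'l', '1', '|']

-- the 'for ch in ocr_text' loop of Source B with its early return
def pvAltLoop : List Char → Int → Bool
  | [], _ => false
  | c :: rest, n =>
    if c ∈ pvSuspChars then
      (if n + 1 ≥ 3 then true else pvAltLoop rest (n + 1))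
    else pvAltLoop rest n

def should_use_llm_correction_alt (ocr_text : String) : Bool :=
  if PySem.Str.len (PySem.Str.strip ocr_text) < 10 then false
  else pvAltLoop ocr_text.toList 0

-- ===== PRECONDITION & SPEC =====
def Spec_should_use_llm_correction (ocr_text : String) (out : Bool) : Prop := out = should_use_llm_correction_alt ocr_text
instance (ocr_text : String) (out : Bool) : Decidable (Spec_should_use_llm_correction ocr_text out) := by unfold Spec_should_use_llm_correction; infer_instance

-- ===== CLAIM (what is proved, stated in full; the proofs are below) =====
def Claim_equal_should_use_llm_correction : Prop := ∀ (ocr_text : String), Dom_should_use_llm_correction ocr_text → Spec_should_use_llm_correction ocr_text (should_use_llm_correction ocr_text)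

-- ===== LEMMAS AND PROOFS =====

-- counting a single-character pattern is counting that character
theorem pv_count_go_single (c : Char) (cs : List Char) :
    ∀ (fuel acc : Nat), cs.length ≤ fuel →
      PySem.Chars.count.go [c] fuel cs acc = acc + cs.count c := by
  induction cs with
  | nil =>
    intro fuel acc _
    cases fuel <;> simp [PySem.Chars.count.go]
  | cons h t ih =>
    intro fuel acc hle
    cases fuel with
    | zero => simp at hle
    | succ f =>
      simp only [PySem.Chars.count.go]
      by_cases hc : c = h
      · subst hc
        simp [List.isPrefixOf, ih f (acc + 1) (by simpa using hle)]
        omega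
      · have : [c].isPrefixOf (h :: t) = false := by
          simp [List.isPrefixOf, hc]
        simp [this, Ne.symm hc, ih f acc (by simpa using hle)]

theorem pv_count_single (cs : List Char) (c : Char) :
    PySem.Chars.count cs [c] = cs.count c := by
  simp [PySem.Chars.count, pv_count_go_single c cs cs.length 0 le_rfl]

def pvSusp (c : Char) : Bool := c ∈ pvSuspChars

-- the sum of the seven counts is the number of suspicious characters
theorem pv_sum7 (cs : List Char) :
    cs.count 'O' + cs.count '0' + cs.count 'o' + cs.count 'I' + cs.count 'l'
      + cs.count '1' + cs.count '|' = cs.countP pvSusp := by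
  induction cs with
  | nil => simp
  | cons h t ih =>
    simp only [List.count_cons, List.countP_cons]
    by_cases hh : pvSusp h
    · have : h = 'O' ∨ h = '0' ∨ h = 'o' ∨ h = 'I' ∨ h = 'l' ∨ h = '1' ∨ h = '|' := by
        simpa [pvSusp, pvSuspChars] using hh
      rcases this with h1 | h1 | h1 | h1 | h1 | h1 | h1 <;> subst h1 <;>
        simp [hh] <;> omega
    · have h1 : h ≠ 'O' := fun e => hh (by simp [pvSusp, pvSuspChars, e])
      have h2 : h ≠ '0' := fun e => hh (by simp [pvSusp, pvSuspChars, e])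
      have h3 : h ≠ 'o' := fun e => hh (by simp [pvSusp, pvSuspChars, e])
      have h4 : h ≠ 'I' := fun e => hh (by simp [pvSusp, pvSuspChars, e])
      have h5 : h ≠ 'l' := fun e => hh (by simp [pvSusp, pvSuspChars, e])
      have h6 : h ≠ '1' := fun e => hh (by simp [pvSusp, pvSuspChars, e])
      have h7 : h ≠ '|' := fun e => hh (by simp [pvSusp, pvSuspChars, e])
      simp [hh, h1, h2, h3, h4, h5, h6, h7, ih]

-- the early-exit loop decides 'count reaches 3'
theorem pv_altLoop_eq (cs : List Char) :
    ∀ (n : Int), n < 3 → pvAltLoop cs n = decide (n + (cs.countP pvSusp : Int) ≥ 3) := by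
  induction cs with
  | nil => intro n hn; simp [pvAltLoop]; omega
  | cons h t ih =>
    intro n hn
    simp only [pvAltLoop, List.countP_cons]
    by_cases hh : pvSusp h
    · have hm : h ∈ pvSuspChars := by simpa [pvSusp] using hh
      by_cases h3 : n + 1 ≥ 3
      · have : (3 : Int) ≤ n + (↑(t.countP pvSusp) + 1) := by
          have : (0 : Int) ≤ (t.countP pvSusp : Int) := Int.natCast_nonneg _
          omega
        simp [hm, h3, hh, this]
      · rw [if_pos hm, if_neg h3, ih (n + 1) (by omega)]
        simp [hh]
        constructor <;> intro hx <;> omega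
    · have hm : h ∉ pvSuspChars := by simpa [pvSusp] using hh
      rw [if_neg hm, ih n hn]
      simp [hh]

-- ===== VERDICT (by name: the statement is the Claim_ definition above) =====
theorem should_use_llm_correction_spec : Claim_equal_should_use_llm_correction := by
  intro s _
  unfold Spec_should_use_llm_correction should_use_llm_correction should_use_llm_correction_alt
  by_cases hshort : PySem.Str.len (PySem.Str.strip s) < 10
  · by_cases hempty : PySem.Str.strip s = ""
    · rw [if_pos hempty, if_pos hshort]
    · rw [if_neg hempty, if_pos hshort, if_pos hshort]
  · have hempty : ¬ PySem.Str.strip s = "" := by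
      intro h; apply hshort; rw [h]; decide
    rw [if_neg hempty, if_neg hshort, if_neg hshort]
    rw [pv_altLoop_eq s.toList 0 (by omega)]
    simp only [List.foldl, PySem.Str.count_eq,
      show "O".toList = ['O'] from rfl, show "0".toList = ['0'] from rfl,
      show "o".toList = ['o'] from rfl, show "I".toList = ['I'] from rfl,
      show "l".toList = ['l'] from rfl, show "1".toList = ['1'] from rfl,
      show "|".toList = ['|'] from rfl, pv_count_single]
    congr 1
    rw [eq_iff_iff]
    rw [← pv_sum7 s.toList]
    push_cast
    omega
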